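-- pv_equiv track=rewrite | github.com/MrBrantCode/unitest_baseline | mut_generate/mist_train_taco/taco_16338/solution.py | count_equal_pairs
-- ===== SOURCE A (Python) =====
-- def count_equal_pairs(s: str) -> int:
--     result = 0
--     d = {}
--
--     # Count the frequency of each character
--     for char in s:
--         d[char] = d.get(char, 0) + 1
--
--     # Calculate the number of equal pairs
--     for count in d.values():
--         result += count * count
--
--     return result
-- ===== SOURCE B (Python) =====
-- def count_equal_pairs(s: str) -> int:
--     result = 0
--     for c in s:
--         for c2 in s:
--             if c == c2:
--                 result += 1
--     return result
-- ===== Notes on version B (the rewrite author's own statement) =====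
-- stated objective: alternative
-- what changed: B counts ordered pairs of equal characters directly with a nested loop over the string, with no frequency dictionary at all; pair counting replaces A's build-a-counter-then-sum-squares pass.
import Mathlib
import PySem

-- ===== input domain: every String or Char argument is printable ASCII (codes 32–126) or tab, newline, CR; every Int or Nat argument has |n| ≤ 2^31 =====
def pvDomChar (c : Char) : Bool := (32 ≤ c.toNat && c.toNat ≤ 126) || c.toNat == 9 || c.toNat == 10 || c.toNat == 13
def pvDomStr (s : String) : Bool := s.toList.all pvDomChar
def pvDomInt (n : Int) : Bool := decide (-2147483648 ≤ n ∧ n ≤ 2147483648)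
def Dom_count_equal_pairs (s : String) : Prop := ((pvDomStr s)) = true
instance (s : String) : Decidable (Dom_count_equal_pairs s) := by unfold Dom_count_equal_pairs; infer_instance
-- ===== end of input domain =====

-- B counts ordered equal-character index pairs with a direct nested loop instead of
-- building a character-frequency dictionary and summing squared counts (alternative
-- decomposition, same return value).

-- ===== PORT A =====
def count_equal_pairs (s : String) : Int :=
  let result : Int := 0
  let d : PySem.Dict Char Int :=
    s.toList.foldl (fun d char => d.insert char (d.getD char 0 + 1)) PySem.Dict.empty
  let result := d.values.foldl (fun result count => result + count * count) result
  result

-- ===== PORT B =====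
def count_equal_pairs_alt (s : String) : Int :=
  let result : Int := 0
  let result := s.toList.foldl (fun result c =>
    s.toList.foldl (fun result c2 =>
      if c == c2 then result + 1 else result) result) result
  result

-- ===== PRECONDITION & SPEC =====
def Spec_count_equal_pairs (s : String) (out : Int) : Prop := out = count_equal_pairs_alt s
instance (s : String) (out : Int) : Decidable (Spec_count_equal_pairs s out) := by unfold Spec_count_equal_pairs; infer_instance

-- ===== CLAIM (what is proved, stated in full; the proofs are below) =====
def Claim_equal_count_equal_pairs : Prop := ∀ (s : String), Dom_count_equal_pairs s → Spec_count_equal_pairs s (count_equal_pairs s)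

-- ===== LEMMAS AND PROOFS =====

-- A equals the sum of squared counts over the distinct characters.
theorem portA_eq (l : List Char) :
    (PySem.Dict.counter l).values.foldl (fun r v => r + v * v) 0
      = ((PySem.Set.ofList l).map (fun k => (l.count k : Int) * (l.count k : Int))).sum := by
  rw [PySem.List.foldl_add (g := fun v => v * v)]
  simp [PySem.Dict.values, PySem.Dict.items_counter, List.map_map, Function.comp_def]

-- B equals the sum over all positions of the count of that position's character.
theorem portB_eq (l : List Char) :
    l.foldl (fun r c => l.foldl (fun r2 c2 => if c == c2 then r2 + 1 else r2) r) 0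
      = (l.map (fun c => (l.count c : Int))).sum := by
  have inner : ∀ (c : Char) (a : Int),
      l.foldl (fun r2 c2 => if c == c2 then r2 + 1 else r2) a = a + (l.count c : Int) := by
    intro c a
    rw [PySem.List.foldl_if_add_one (p := fun c2 => c == c2)]
    congr 2
    simp [List.count, BEq.comm]
  calc l.foldl (fun r c => l.foldl (fun r2 c2 => if c == c2 then r2 + 1 else r2) r) 0
      = l.foldl (fun r c => r + (l.count c : Int)) 0 := by
        apply PySem.List.foldl_congr_mem
        intro a c _
        exact inner c a
    _ = _ := by rw [PySem.List.foldl_add (g := fun c => (l.count c : Int))]; simp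

-- grouping identity: summing count(a) over every element a of l is summing count(k)^2
-- over the distinct characters k.
theorem group_eq (l : List Char) :
    ((PySem.Set.ofList l).map (fun k => (l.count k : Int) * (l.count k : Int))).sum
      = (l.map (fun c => (l.count c : Int))).sum := by
  have hfin : (PySem.Set.ofList l).toFinset = l.toFinset := by
    ext x; simp [PySem.Set.mem_ofList]
  rw [← List.sum_toFinset _ (PySem.Set.nodup_ofList l), hfin,
      Finset.sum_list_map_count l (fun c => (l.count c : Int))]
  apply Finset.sum_congr rfl
  intro x _
  simp

-- ===== VERDICT (by name: the statement is the Claim_ definition above) =====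
theorem count_equal_pairs_spec : Claim_equal_count_equal_pairs := by
  intro s _
  unfold Spec_count_equal_pairs count_equal_pairs count_equal_pairs_alt
  simp only []
  rw [PySem.Dict.foldl_insert_getD_add_one_eq_counter, portA_eq, portB_eq, group_eq]
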